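-- pv_equiv track=rewrite | github.com/echo313unfolding/FGIP | fgip/agents/agent_factory.py | categorize_gap
-- ===== SOURCE A (Python) =====
-- def categorize_gap(edge_type: str) -> str:
--     """Determine the category of an edge type gap."""
--     categories = {
--         'supply_chain': [
--             'SUPPLIES_TO', 'DEPENDS_ON', 'CUSTOMER_OF', 'BOTTLENECK_AT',
--             'COMPETES_WITH',
--         ],
--         'governance': [
--             'SITS_ON_BOARD', 'APPOINTED_BY', 'RELATED_PARTY_TXN',
--             'MEMBER_OF',
--         ],
--         'causal': [
--             'CAUSED', 'ENABLED', 'CONTRIBUTED_TO', 'BLOCKED',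
--             'REPLACED', 'REDUCED',
--         ],
--         'financial': [
--             'OWNS_SHARES', 'ACQUIRED', 'SUBSIDIARY_OF',
--             'INVESTED_IN', 'FUNDED',
--         ],
--         'court_records': [
--             'FILED_AMICUS', 'RULED_ON', 'ARGUED', 'SUED',
--         ],
--         'foreign_influence': [
--             'REGISTERED_AS_AGENT', 'REPRESENTS', 'LOBBIED_FOR',
--         ],
--     }
--
--     for category, types in categories.items():
--         if edge_type in types:
--             return category
--
--     return 'unknown'
-- ===== SOURCE B (Python) =====
-- EDGE_CATEGORY = {
--     'SUPPLIES_TO': 'supply_chain', 'DEPENDS_ON': 'supply_chain',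
--     'CUSTOMER_OF': 'supply_chain', 'BOTTLENECK_AT': 'supply_chain',
--     'COMPETES_WITH': 'supply_chain',
--     'SITS_ON_BOARD': 'governance', 'APPOINTED_BY': 'governance',
--     'RELATED_PARTY_TXN': 'governance', 'MEMBER_OF': 'governance',
--     'CAUSED': 'causal', 'ENABLED': 'causal', 'CONTRIBUTED_TO': 'causal',
--     'BLOCKED': 'causal', 'REPLACED': 'causal', 'REDUCED': 'causal',
--     'OWNS_SHARES': 'financial', 'ACQUIRED': 'financial',
--     'SUBSIDIARY_OF': 'financial', 'INVESTED_IN': 'financial',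
--     'FUNDED': 'financial',
--     'FILED_AMICUS': 'court_records', 'RULED_ON': 'court_records',
--     'ARGUED': 'court_records', 'SUED': 'court_records',
--     'REGISTERED_AS_AGENT': 'foreign_influence',
--     'REPRESENTS': 'foreign_influence', 'LOBBIED_FOR': 'foreign_influence',
-- }
--
--
-- def categorize_gap(edge_type: str) -> str:
--     """Determine the category of an edge type gap."""
--     return EDGE_CATEGORY.get(edge_type, 'unknown')
-- ===== Notes on version B (the rewrite author's own statement) =====
-- stated objective: idiomatic
-- what changed: B replaces A's per-call nested structure (a category->list dict scanned with a membership loop) by a single flat module-level edge_type->category dict literal queried with one .get call, no loop at all.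
import Mathlib
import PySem

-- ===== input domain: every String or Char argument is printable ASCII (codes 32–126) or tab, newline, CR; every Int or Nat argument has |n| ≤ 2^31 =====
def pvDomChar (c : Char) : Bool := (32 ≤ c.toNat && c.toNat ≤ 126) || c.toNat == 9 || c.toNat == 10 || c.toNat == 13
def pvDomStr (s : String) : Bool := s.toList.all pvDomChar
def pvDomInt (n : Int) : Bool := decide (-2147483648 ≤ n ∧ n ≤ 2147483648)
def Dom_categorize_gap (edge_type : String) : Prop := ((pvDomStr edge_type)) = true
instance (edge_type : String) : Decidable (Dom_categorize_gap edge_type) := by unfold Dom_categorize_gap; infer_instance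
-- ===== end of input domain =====

-- B replaces A's per-call scan over a category->list dict by one flat edge_type->category dict looked up directly; equivalence of return values.
-- ===== PORT A =====
-- the categories dict literal of A, as an insertion-ordered association list
def pvCategories : List (String × List String) := [
  ("supply_chain", ["SUPPLIES_TO", "DEPENDS_ON", "CUSTOMER_OF", "BOTTLENECK_AT", "COMPETES_WITH"]),
  ("governance", ["SITS_ON_BOARD", "APPOINTED_BY", "RELATED_PARTY_TXN", "MEMBER_OF"]),
  ("causal", ["CAUSED", "ENABLED", "CONTRIBUTED_TO", "BLOCKED", "REPLACED", "REDUCED"]),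
  ("financial", ["OWNS_SHARES", "ACQUIRED", "SUBSIDIARY_OF", "INVESTED_IN", "FUNDED"]),
  ("court_records", ["FILED_AMICUS", "RULED_ON", "ARGUED", "SUED"]),
  ("foreign_influence", ["REGISTERED_AS_AGENT", "REPRESENTS", "LOBBIED_FOR"])
]

-- 'for category, types in categories.items(): if edge_type in types: return category' / 'return "unknown"'
def pvCatLoop (edge_type : String) : List (String × List String) → String
  | [] => "unknown"
  | (category, types) :: rest =>
      if types.contains edge_type then category else pvCatLoop edge_type rest

def categorize_gap (edge_type : String) : String :=
  pvCatLoop edge_type pvCategories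

-- ===== PORT B =====
-- EDGE_CATEGORY: the flat module-level dict literal of Source B (edge_type -> category)
def pvEDGE_CATEGORY : PySem.Dict String String := PySem.Dict.ofList [
  ("SUPPLIES_TO", "supply_chain"),
  ("DEPENDS_ON", "supply_chain"),
  ("CUSTOMER_OF", "supply_chain"),
  ("BOTTLENECK_AT", "supply_chain"),
  ("COMPETES_WITH", "supply_chain"),
  ("SITS_ON_BOARD", "governance"),
  ("APPOINTED_BY", "governance"),
  ("RELATED_PARTY_TXN", "governance"),
  ("MEMBER_OF", "governance"),
  ("CAUSED", "causal"),
  ("ENABLED", "causal"),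
  ("CONTRIBUTED_TO", "causal"),
  ("BLOCKED", "causal"),
  ("REPLACED", "causal"),
  ("REDUCED", "causal"),
  ("OWNS_SHARES", "financial"),
  ("ACQUIRED", "financial"),
  ("SUBSIDIARY_OF", "financial"),
  ("INVESTED_IN", "financial"),
  ("FUNDED", "financial"),
  ("FILED_AMICUS", "court_records"),
  ("RULED_ON", "court_records"),
  ("ARGUED", "court_records"),
  ("SUED", "court_records"),
  ("REGISTERED_AS_AGENT", "foreign_influence"),
  ("REPRESENTS", "foreign_influence"),
  ("LOBBIED_FOR", "foreign_influence")
]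

-- return EDGE_CATEGORY.get(edge_type, 'unknown')
def categorize_gap_alt (edge_type : String) : String :=
  pvEDGE_CATEGORY.getD edge_type "unknown"

-- ===== PRECONDITION & SPEC =====
def Spec_categorize_gap (edge_type : String) (out : String) : Prop := out = categorize_gap_alt edge_type
instance (edge_type : String) (out : String) : Decidable (Spec_categorize_gap edge_type out) := by unfold Spec_categorize_gap; infer_instance

-- ===== CLAIM (what is proved, stated in full; the proofs are below) =====
def Claim_equal_categorize_gap : Prop := ∀ (edge_type : String), Dom_categorize_gap edge_type → Spec_categorize_gap edge_type (categorize_gap edge_type)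

-- ===== LEMMAS AND PROOFS =====

-- ===== VERDICT (by name: the statement is the Claim_ definition above) =====
theorem categorize_gap_spec : Claim_equal_categorize_gap := by
  intro edge_type _
  unfold Spec_categorize_gap categorize_gap categorize_gap_alt
  by_cases h0 : edge_type = "SUPPLIES_TO"
  · subst h0; decide
  by_cases h1 : edge_type = "DEPENDS_ON"
  · subst h1; decide
  by_cases h2 : edge_type = "CUSTOMER_OF"
  · subst h2; decide
  by_cases h3 : edge_type = "BOTTLENECK_AT"
  · subst h3; decide
  by_cases h4 : edge_type = "COMPETES_WITH"
  · subst h4; decide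
  by_cases h5 : edge_type = "SITS_ON_BOARD"
  · subst h5; decide
  by_cases h6 : edge_type = "APPOINTED_BY"
  · subst h6; decide
  by_cases h7 : edge_type = "RELATED_PARTY_TXN"
  · subst h7; decide
  by_cases h8 : edge_type = "MEMBER_OF"
  · subst h8; decide
  by_cases h9 : edge_type = "CAUSED"
  · subst h9; decide
  by_cases h10 : edge_type = "ENABLED"
  · subst h10; decide
  by_cases h11 : edge_type = "CONTRIBUTED_TO"
  · subst h11; decide
  by_cases h12 : edge_type = "BLOCKED"
  · subst h12; decide
  by_cases h13 : edge_type = "REPLACED"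
  · subst h13; decide
  by_cases h14 : edge_type = "REDUCED"
  · subst h14; decide
  by_cases h15 : edge_type = "OWNS_SHARES"
  · subst h15; decide
  by_cases h16 : edge_type = "ACQUIRED"
  · subst h16; decide
  by_cases h17 : edge_type = "SUBSIDIARY_OF"
  · subst h17; decide
  by_cases h18 : edge_type = "INVESTED_IN"
  · subst h18; decide
  by_cases h19 : edge_type = "FUNDED"
  · subst h19; decide
  by_cases h20 : edge_type = "FILED_AMICUS"
  · subst h20; decide
  by_cases h21 : edge_type = "RULED_ON"
  · subst h21; decide
  by_cases h22 : edge_type = "ARGUED"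
  · subst h22; decide
  by_cases h23 : edge_type = "SUED"
  · subst h23; decide
  by_cases h24 : edge_type = "REGISTERED_AS_AGENT"
  · subst h24; decide
  by_cases h25 : edge_type = "REPRESENTS"
  · subst h25; decide
  by_cases h26 : edge_type = "LOBBIED_FOR"
  · subst h26; decide
  simp [pvCategories, pvEDGE_CATEGORY, pvCatLoop, PySem.Dict.getD, PySem.Dict.ofList,
        PySem.Dict.get?, PySem.Dict.update, PySem.Dict.insert, PySem.Dict.empty, List.find?,
        h0, h1, h2, h3, h4, h5, h6, h7, h8, h9, h10, h11, h12, h13, h14, h15, h16, h17, h18, h19, h20, h21, h22, h23, h24, h25, h26, beq_eq_false_iff_ne.mpr (Ne.symm h0), beq_eq_false_iff_ne.mpr (Ne.symm h1), beq_eq_false_iff_ne.mpr (Ne.symm h2), beq_eq_false_iff_ne.mpr (Ne.symm h3), beq_eq_false_iff_ne.mpr (Ne.symm h4), beq_eq_false_iff_ne.mpr (Ne.symm h5), beq_eq_false_iff_ne.mpr (Ne.symm h6), beq_eq_false_iff_ne.mpr (Ne.symm h7), beq_eq_false_iff_ne.mpr (Ne.symm h8), beq_eq_false_iff_ne.mpr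 (Ne.symm h9), beq_eq_false_iff_ne.mpr (Ne.symm h10), beq_eq_false_iff_ne.mpr (Ne.symm h11), beq_eq_false_iff_ne.mpr (Ne.symm h12), beq_eq_false_iff_ne.mpr (Ne.symm h13), beq_eq_false_iff_ne.mpr (Ne.symm h14), beq_eq_false_iff_ne.mpr (Ne.symm h15), beq_eq_false_iff_ne.mpr (Ne.symm h16), beq_eq_false_iff_ne.mpr (Ne.symm h17), beq_eq_false_iff_ne.mpr (Ne.symm h18), beq_eq_false_iff_ne.mpr (Ne.symm h19), beq_eq_false_iff_ne.mpr (Ne.symm h20), beq_eq_false_iff_ne.mpr (Ne.symm h21), beq_eq_false_iff_ne.mpr (Ne.symm h22), beq_eq_false_iff_ne.mpr (Ne.symm h23), beq_eq_false_iff_ne.mpr (Ne.symm h24), beq_eq_false_iff_ne.mpr (Ne.symm h25), beq_eq_false_iff_ne.mpr (Ne.symm h26)]
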